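-- pv_equiv track=rewrite | github.com/alperyazir/flow-central-storage | apps/api/app/services/unified_analysis/service.py | _get_pages_text
-- ===== SOURCE A (Python) =====
-- def _get_pages_text(
--
--     pages: dict[int, str],
--     start_page: int,
--     end_page: int,
-- ) -> str:
--     """Get concatenated text for a page range."""
--     text_parts = []
--     for page_num in range(start_page, end_page + 1):
--         if page_num in pages:
--             text_parts.append(f"--- Page {page_num} ---\n{pages[page_num]}")
--     return "\n\n".join(text_parts)
-- ===== SOURCE B (Python) =====
-- def _get_pages_text(
--     pages: dict[int, str],
--     start_page: int,
--     end_page: int,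
-- ) -> str:
--     """Get concatenated text for a page range."""
--     keys = sorted(k for k in pages if start_page <= k <= end_page)
--     return "\n\n".join(f"--- Page {k} ---\n{pages[k]}" for k in keys)
-- ===== Notes on version B (the rewrite author's own statement) =====
-- stated objective: alternative
-- what changed: B iterates the dict's own keys (filtered to the range, then sorted) in a single pass instead of scanning every integer in range(start_page, end_page+1) and probing the dict for membership; cost becomes O(p log p) in the number of pages rather than O(range width).
import Mathlib
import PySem

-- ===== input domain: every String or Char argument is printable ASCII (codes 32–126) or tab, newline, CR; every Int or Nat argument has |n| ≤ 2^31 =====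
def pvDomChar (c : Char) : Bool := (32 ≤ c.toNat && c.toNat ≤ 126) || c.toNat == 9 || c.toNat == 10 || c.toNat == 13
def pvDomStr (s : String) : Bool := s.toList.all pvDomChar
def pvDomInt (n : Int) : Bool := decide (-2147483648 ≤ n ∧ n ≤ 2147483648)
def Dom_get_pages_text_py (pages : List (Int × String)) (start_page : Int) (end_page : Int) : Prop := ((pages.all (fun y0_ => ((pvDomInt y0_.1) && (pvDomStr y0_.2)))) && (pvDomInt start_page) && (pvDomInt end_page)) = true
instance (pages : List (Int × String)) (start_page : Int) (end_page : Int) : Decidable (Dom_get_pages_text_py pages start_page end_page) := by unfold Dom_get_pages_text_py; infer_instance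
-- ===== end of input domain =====

-- B iterates the dict's own keys (filtered to the range, then sorted) in one pass instead of
-- scanning every integer of the range and probing membership; equal return value (alternative).

-- ===== PORT A =====
def get_pages_text_py (pages : List (Int × String)) (start_page : Int) (end_page : Int) : String :=
  -- pages is a dict; text_parts is built by scanning range(start_page, end_page+1)
  PySem.Str.join "\n\n"
    ((PySem.List.pyRange start_page (end_page + 1) 1).foldl
      (fun acc page_num =>
        if (PySem.Dict.ofList pages).contains page_num then
          acc ++ ["--- Page " ++ PySem.Int.toStr page_num ++ " ---\n" ++ (PySem.Dict.ofList pages).getD page_num ""]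
        else acc) [])

-- ===== PORT B =====
def get_pages_text_py_alt (pages : List (Int × String)) (start_page : Int) (end_page : Int) : String :=
  -- keys = sorted(k for k in pages if start_page <= k <= end_page), then one pass of formatting
  PySem.Str.join "\n\n"
    ((PySem.List.sorted
        ((PySem.Dict.ofList pages).keys.filter (fun k => decide (start_page ≤ k) && decide (k ≤ end_page)))
        (fun k => k) false).map
      (fun k => "--- Page " ++ PySem.Int.toStr k ++ " ---\n" ++ (PySem.Dict.ofList pages).getD k ""))

-- ===== PRECONDITION & SPEC =====
def Spec_get_pages_text_py (pages : List (Int × String)) (start_page : Int) (end_page : Int) (out : String) : Prop := out = get_pages_text_py_alt pages start_page end_page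
instance (pages : List (Int × String)) (start_page : Int) (end_page : Int) (out : String) : Decidable (Spec_get_pages_text_py pages start_page end_page out) := by unfold Spec_get_pages_text_py; infer_instance

-- ===== CLAIM (what is proved, stated in full; the proofs are below) =====
def Claim_equal_get_pages_text_py : Prop := ∀ (pages : List (Int × String)) (start_page : Int) (end_page : Int), Dom_get_pages_text_py pages start_page end_page → Spec_get_pages_text_py pages start_page end_page (get_pages_text_py pages start_page end_page)

-- ===== LEMMAS AND PROOFS =====

-- the two key lists agree: sorted(filter keys) = filter range
theorem keys_eq (d : PySem.Dict Int String) (s e : Int) (hnd : d.keys.Nodup) :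
    PySem.List.sorted (d.keys.filter (fun k => decide (s ≤ k) && decide (k ≤ e))) (fun k => k) false
      = (PySem.List.pyRange s (e + 1) 1).filter (fun k => d.contains k) := by
  apply PySem.List.sorted_eq_of_perm_of_pairwise_lt
  · rw [List.perm_ext_iff_of_nodup (List.Nodup.filter _ (PySem.List.nodup_pyRange_one s (e+1)))
        (List.Nodup.filter _ hnd)]
    intro k
    simp [List.mem_filter, PySem.List.mem_pyRange_one, PySem.Dict.contains_iff_mem_keys]
    tauto
  · exact List.Pairwise.filter _ (PySem.List.pairwise_lt_pyRange_one s (e+1))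

-- ===== VERDICT (by name: the statement is the Claim_ definition above) =====
theorem get_pages_text_py_spec : Claim_equal_get_pages_text_py := by
  intro pages s e _
  unfold Spec_get_pages_text_py get_pages_text_py get_pages_text_py_alt
  rw [PySem.List.foldl_append_if, keys_eq _ _ _ (PySem.Dict.nodup_keys_ofList pages)]
  rfl
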